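-- pv_equiv track=rewrite | github.com/torlayl/RAG | 12_Import_Biolink_yaml.py | categorize_prefix
-- ===== SOURCE A (Python) =====
-- def categorize_prefix(prefix: str, uri: str) -> str:
--     """Categorize prefixes based on their domain."""
--     prefix_lower = prefix.lower()
--     uri_lower = uri.lower()
--
--     if any(term in prefix_lower for term in ['ncbi', 'ensembl', 'uniprot', 'gene']):
--         return 'Genomics'
--     elif any(term in prefix_lower for term in ['chebi', 'pubchem', 'drug', 'chem']):
--         return 'Chemistry'
--     elif any(term in prefix_lower for term in ['mondo', 'hp', 'doid', 'disease']):
--         return 'Disease'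
--     elif any(term in prefix_lower for term in ['go', 'so', 'uberon', 'anatomy']):
--         return 'Ontology'
--     elif any(term in prefix_lower for term in ['pmid', 'doi', 'isbn']):
--         return 'Publications'
--     elif any(term in prefix_lower for term in ['wikidata', 'schema', 'rdf', 'owl']):
--         return 'Semantic_Web'
--     else:
--         return 'Other'
-- ===== SOURCE B (Python) =====
-- # Substring-enumeration approach: enumerate every window of 2..8 characters of
-- # the lowered prefix, look each one up in a keyword->bucket-rank hash map, and
-- # keep the minimum rank seen; the answer is the category of that minimum rank.
--
-- _RANK = {
--     'ncbi': 0, 'ensembl': 0, 'uniprot': 0, 'gene': 0,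
--     'chebi': 1, 'pubchem': 1, 'drug': 1, 'chem': 1,
--     'mondo': 2, 'hp': 2, 'doid': 2, 'disease': 2,
--     'go': 3, 'so': 3, 'uberon': 3, 'anatomy': 3,
--     'pmid': 4, 'doi': 4, 'isbn': 4,
--     'wikidata': 5, 'schema': 5, 'rdf': 5, 'owl': 5,
-- }
-- _CATS = ['Genomics', 'Chemistry', 'Disease', 'Ontology',
--          'Publications', 'Semantic_Web', 'Other']
--
--
-- def categorize_prefix(prefix: str, uri: str) -> str:
--     """Categorize prefixes based on their domain."""
--     p = prefix.lower()
--     uri.lower()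
--     best = 6
--     for i in range(len(p)):
--         for length in range(2, 9):
--             best = min(best, _RANK.get(p[i:i + length], 6))
--     return _CATS[best]
-- ===== Notes on version B (the rewrite author's own statement) =====
-- stated objective: alternative
-- what changed: Instead of running a substring search for each keyword of each category in an if/elif chain, B enumerates every 2..8-character window of the lowered prefix once, looks each window up in a keyword->rank hash map, keeps the minimum rank, and indexes a category list with it.
import Mathlib
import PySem

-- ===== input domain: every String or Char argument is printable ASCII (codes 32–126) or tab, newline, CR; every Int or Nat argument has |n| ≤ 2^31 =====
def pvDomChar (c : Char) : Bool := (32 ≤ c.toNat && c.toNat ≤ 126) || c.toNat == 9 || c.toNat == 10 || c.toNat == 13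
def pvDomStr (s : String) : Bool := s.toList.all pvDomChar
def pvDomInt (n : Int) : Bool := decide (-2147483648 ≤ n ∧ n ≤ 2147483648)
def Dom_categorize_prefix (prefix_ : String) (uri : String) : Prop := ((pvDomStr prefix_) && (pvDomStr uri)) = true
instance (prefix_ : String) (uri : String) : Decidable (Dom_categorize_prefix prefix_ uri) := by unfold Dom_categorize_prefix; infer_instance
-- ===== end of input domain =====

-- B replaces A's per-keyword substring searches in an if/elif chain by a single
-- enumeration of all 2..8-character windows of the lowered prefix, a hash-map
-- lookup per window keeping the minimum bucket rank (objective: alternative).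

-- ===== PORT A =====
def categorize_prefix (prefix_ : String) (uri : String) : String :=
  let prefix_lower := PySem.Str.lower prefix_
  let _uri_lower := PySem.Str.lower uri
  if (["ncbi", "ensembl", "uniprot", "gene"].any fun t => PySem.Str.isIn t prefix_lower) then
    "Genomics"
  else if (["chebi", "pubchem", "drug", "chem"].any fun t => PySem.Str.isIn t prefix_lower) then
    "Chemistry"
  else if (["mondo", "hp", "doid", "disease"].any fun t => PySem.Str.isIn t prefix_lower) then
    "Disease"
  else if (["go", "so", "uberon", "anatomy"].any fun t => PySem.Str.isIn t prefix_lower) then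
    "Ontology"
  else if (["pmid", "doi", "isbn"].any fun t => PySem.Str.isIn t prefix_lower) then
    "Publications"
  else if (["wikidata", "schema", "rdf", "owl"].any fun t => PySem.Str.isIn t prefix_lower) then
    "Semantic_Web"
  else
    "Other"

-- ===== PORT B =====
-- the keyword -> bucket-rank dict _RANK of Source B
def pvRank : PySem.Dict String Nat := PySem.Dict.mk
  [("ncbi", 0), ("ensembl", 0), ("uniprot", 0), ("gene", 0),
   ("chebi", 1), ("pubchem", 1), ("drug", 1), ("chem", 1),
   ("mondo", 2), ("hp", 2), ("doid", 2), ("disease", 2),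
   ("go", 3), ("so", 3), ("uberon", 3), ("anatomy", 3),
   ("pmid", 4), ("doi", 4), ("isbn", 4),
   ("wikidata", 5), ("schema", 5), ("rdf", 5), ("owl", 5)]

-- the category list _CATS of Source B
def pvCats : List String :=
  ["Genomics", "Chemistry", "Disease", "Ontology", "Publications", "Semantic_Web", "Other"]

def categorize_prefix_alt (prefix_ : String) (uri : String) : String :=
  let p := PySem.Str.lower prefix_
  let _u := PySem.Str.lower uri
  let best := (PySem.List.pyRange 0 (PySem.Str.len p) 1).foldl
    (fun best i => (PySem.List.pyRange 2 9 1).foldl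
      (fun best length =>
        min best (pvRank.getD (PySem.Str.slice p (some i) (some (i + length))) 6)) best) 6
  PySem.List.pyGetD pvCats (best : Int) "Other"

-- ===== PRECONDITION & SPEC =====
def Spec_categorize_prefix (prefix_ : String) (uri : String) (out : String) : Prop := out = categorize_prefix_alt prefix_ uri
instance (prefix_ : String) (uri : String) (out : String) : Decidable (Spec_categorize_prefix prefix_ uri out) := by unfold Spec_categorize_prefix; infer_instance

-- ===== CLAIM (what is proved, stated in full; the proofs are below) =====
def Claim_equal_categorize_prefix : Prop := ∀ (prefix_ : String) (uri : String), Dom_categorize_prefix prefix_ uri → Spec_categorize_prefix prefix_ uri (categorize_prefix prefix_ uri)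

-- ===== LEMMAS AND PROOFS =====

-- proof-only helpers: name the pieces of B's loop
def pvBest (p : String) : Nat :=
  (PySem.List.pyRange 0 (PySem.Str.len p) 1).foldl
    (fun best i => (PySem.List.pyRange 2 9 1).foldl
      (fun best length =>
        min best (pvRank.getD (PySem.Str.slice p (some i) (some (i + length))) 6)) best) 6

def pvS (p : String) : List Nat :=
  (PySem.List.pyRange 0 (PySem.Str.len p) 1).flatMap
    (fun i => (PySem.List.pyRange 2 9 1).map
      (fun length => pvRank.getD (PySem.Str.slice p (some i) (some (i + length))) 6))

-- keyword lists of bucket j (A's chain order); pvMatches p j = "category j's any(...) fires"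
def pvKws : Nat → List String
  | 0 => ["ncbi", "ensembl", "uniprot", "gene"]
  | 1 => ["chebi", "pubchem", "drug", "chem"]
  | 2 => ["mondo", "hp", "doid", "disease"]
  | 3 => ["go", "so", "uberon", "anatomy"]
  | 4 => ["pmid", "doi", "isbn"]
  | 5 => ["wikidata", "schema", "rdf", "owl"]
  | _ => []

def pvMatches (p : String) (j : Nat) : Bool := (pvKws j).any (fun t => PySem.Str.isIn t p)

theorem pv_alt_eq (prefix_ uri : String) :
    categorize_prefix_alt prefix_ uri
      = PySem.List.pyGetD pvCats (pvBest (PySem.Str.lower prefix_) : Int) "Other" := rfl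

theorem pv_inner_foldl (ys : List Int) (g : Int → Nat) (b : Nat) :
    ys.foldl (fun b L => min b (g L)) b = (ys.map g).foldl min b := by
  induction ys generalizing b with
  | nil => rfl
  | cons y t ih => simp [ih]

theorem pv_flatten (xs ys : List Int) (r : Int → Int → Nat) (b : Nat) :
    xs.foldl (fun b i => ys.foldl (fun b L => min b (r i L)) b) b
      = (xs.flatMap (fun i => ys.map (r i))).foldl min b := by
  induction xs generalizing b with
  | nil => rfl
  | cons x t ih =>
    simp only [List.foldl_cons, List.flatMap_cons, List.foldl_append]
    rw [ih, pv_inner_foldl]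

theorem pvBest_eq (p : String) : pvBest p = (pvS p).foldl min 6 :=
  pv_flatten _ _ _ _

theorem pvBest_le6 (p : String) : pvBest p ≤ 6 := by
  rw [pvBest_eq]; exact (PySem.List.foldl_min_le (pvS p) 6).1

theorem pv_getD_cases (l : List (String × Nat)) (s : String) (d : Nat) :
    (PySem.Dict.mk l).getD s d = d ∨
      ∃ kv ∈ l, kv.1 = s ∧ (PySem.Dict.mk l).getD s d = kv.2 := by
  induction l with
  | nil => left; rfl
  | cons kv t ih =>
    obtain ⟨k, v⟩ := kv
    by_cases h : k = s
    · right
      refine ⟨(k, v), List.mem_cons_self, h, ?_⟩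
      show ((PySem.Dict.mk ((k, v) :: t)).get? s).getD d = v
      rw [PySem.Dict.get?_mk_cons]
      simp [h]
    · have hstep : (PySem.Dict.mk ((k, v) :: t)).getD s d = (PySem.Dict.mk t).getD s d := by
        show ((PySem.Dict.mk ((k, v) :: t)).get? s).getD d = ((PySem.Dict.mk t).get? s).getD d
        rw [PySem.Dict.get?_mk_cons]
        simp [h]
      rw [hstep]
      rcases ih with h0 | ⟨kv', hmem, he, hv⟩
      · left; exact h0
      · right; exact ⟨kv', List.mem_cons_of_mem _ hmem, he, hv⟩

-- a drop/take window of the string is an infix of it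
theorem pv_slice_infix (p : String) (i L : Int) (hi : 0 ≤ i) (hL : 0 ≤ L) :
    (PySem.Str.slice p (some i) (some (i + L))).toList <:+: p.toList := by
  rw [PySem.Str.toList_slice, PySem.Chars.slice_eq_listSlice, PySem.List.slice_toNat]
  · exact ((p.toList.drop i.toNat).take_prefix _).isInfix.trans (p.toList.drop_suffix i.toNat).isInfix
  · exact hi
  · omega

-- every rank produced by B's loop is 6 or the rank of a matching category
theorem pv_sound (p : String) (y : Nat) (hy : y ∈ pvS p) :
    y = 6 ∨ pvMatches p y = true := by
  simp only [pvS, List.mem_flatMap, List.mem_map] at hy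
  obtain ⟨i, hi, L, hL, hy⟩ := hy
  rw [PySem.List.mem_pyRange_one] at hi hL
  rcases pv_getD_cases
      [("ncbi", 0), ("ensembl", 0), ("uniprot", 0), ("gene", 0),
       ("chebi", 1), ("pubchem", 1), ("drug", 1), ("chem", 1),
       ("mondo", 2), ("hp", 2), ("doid", 2), ("disease", 2),
       ("go", 3), ("so", 3), ("uberon", 3), ("anatomy", 3),
       ("pmid", 4), ("doi", 4), ("isbn", 4),
       ("wikidata", 5), ("schema", 5), ("rdf", 5), ("owl", 5)]
      (PySem.Str.slice p (some i) (some (i + L))) 6 with h6 | ⟨kv, hmem, hk, hval⟩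
  · left; rw [← hy]; exact h6
  · have hIn : PySem.Str.isIn kv.1 p = true := by
      rw [PySem.Str.isIn_iff_infix, hk]
      exact pv_slice_infix p i L hi.1 (by omega)
    have hy2 : y = kv.2 := by rw [← hy]; exact hval
    right
    rw [hy2]
    fin_cases hmem <;> simp_all [pvMatches, pvKws]

theorem pvBest_sound (p : String) (h : pvBest p < 6) : pvMatches p (pvBest p) = true := by
  rw [pvBest_eq] at h ⊢
  rcases PySem.List.foldl_min_mem (pvS p) 6 with h6 | hmem
  · omega
  · rcases pv_sound p _ hmem with h6 | hm
    · omega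
    · exact hm

-- if category j matches, B's minimum is at most j
-- a keyword that occurs in p shows up as one of B's windows
theorem pv_window (p k : String) (h2 : 2 ≤ k.toList.length) (h8 : k.toList.length ≤ 8)
    (hIn : PySem.Str.isIn k p = true) : pvRank.getD k 6 ∈ pvS p := by
  have hC : PySem.Chars.isIn k.toList p.toList = true := by
    rw [PySem.Chars.isIn_iff_infix]
    exact (PySem.Str.isIn_iff_infix _ _).mp hIn
  obtain ⟨i, hpre⟩ := (PySem.Chars.exists_prefix_drop_iff_isIn _ _).mpr hC
  have hilen : i + k.toList.length ≤ p.toList.length := by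
    have := hpre.length_le
    rw [List.length_drop] at this
    omega
  have hslice : PySem.Str.slice p (some (i : Int)) (some ((i : Int) + (k.toList.length : Int))) = k := by
    apply String.toList_inj.mp
    rw [PySem.Str.toList_slice, PySem.Chars.slice_eq_listSlice, PySem.List.slice_natCast_add]
    exact (List.prefix_iff_eq_take.mp hpre).symm
  simp only [pvS, List.mem_flatMap, List.mem_map]
  refine ⟨(i : Int), ?_, (k.toList.length : Int), ?_, ?_⟩
  · rw [PySem.List.mem_pyRange_one]
    constructor
    · omega
    · have hlen : PySem.Str.len p = (p.toList.length : Int) := by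
        simp [PySem.Str.len]
      rw [hlen]; omega
  · rw [PySem.List.mem_pyRange_one]; omega
  · rw [hslice]

theorem pv_complete (p : String) (j : Nat) (h : pvMatches p j = true) : pvBest p ≤ j := by
  have key : ∀ k : String, k ∈ pvKws j → PySem.Str.isIn k p = true → pvBest p ≤ j := by
    intro k hk hIn
    match j with
    | 0 | 1 | 2 | 3 | 4 | 5 =>
      fin_cases hk <;>
        · have m := pv_window p _ (by decide) (by decide) hIn
          rw [pvBest_eq]
          have hle := (PySem.List.foldl_min_le (pvS p) 6).2 _ m
          exact le_trans hle (by decide)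
    | (n + 6) => simp [pvKws] at hk
  simp only [pvMatches, List.any_eq_true] at h
  obtain ⟨k, hk, hIn⟩ := h
  exact key k hk hIn

-- ===== VERDICT (by name: the statement is the Claim_ definition above) =====
theorem categorize_prefix_spec : Claim_equal_categorize_prefix := by
  intro prefix_ uri _
  unfold Spec_categorize_prefix
  rw [pv_alt_eq]
  have hble := pvBest_le6 (PySem.Str.lower prefix_)
  have hsound := pvBest_sound (PySem.Str.lower prefix_)
  have hcomp := pv_complete (PySem.Str.lower prefix_)
  dsimp only [categorize_prefix]
  generalize hbdef : pvBest (PySem.Str.lower prefix_) = b at hble hsound ⊢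
  by_cases h0 : (["ncbi", "ensembl", "uniprot", "gene"].any fun t => PySem.Str.isIn t (PySem.Str.lower prefix_)) = true
  · rw [if_pos h0]
    have hub : b ≤ 0 := hbdef ▸ hcomp 0 h0
    have hbj : b = 0 := by omega
    rw [hbj]; rfl
  · rw [if_neg h0]
    by_cases h1 : (["chebi", "pubchem", "drug", "chem"].any fun t => PySem.Str.isIn t (PySem.Str.lower prefix_)) = true
    · rw [if_pos h1]
      have hub : b ≤ 1 := hbdef ▸ hcomp 1 h1
      have hbj : b = 1 := by
        interval_cases b
        · exact absurd (hsound (by omega)) h0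
        · rfl
      rw [hbj]; rfl
    · rw [if_neg h1]
      by_cases h2 : (["mondo", "hp", "doid", "disease"].any fun t => PySem.Str.isIn t (PySem.Str.lower prefix_)) = true
      · rw [if_pos h2]
        have hub : b ≤ 2 := hbdef ▸ hcomp 2 h2
        have hbj : b = 2 := by
          interval_cases b
          · exact absurd (hsound (by omega)) h0
          · exact absurd (hsound (by omega)) h1
          · rfl
        rw [hbj]; rfl
      · rw [if_neg h2]
        by_cases h3 : (["go", "so", "uberon", "anatomy"].any fun t => PySem.Str.isIn t (PySem.Str.lower prefix_)) = true
        · rw [if_pos h3]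
          have hub : b ≤ 3 := hbdef ▸ hcomp 3 h3
          have hbj : b = 3 := by
            interval_cases b
            · exact absurd (hsound (by omega)) h0
            · exact absurd (hsound (by omega)) h1
            · exact absurd (hsound (by omega)) h2
            · rfl
          rw [hbj]; rfl
        · rw [if_neg h3]
          by_cases h4 : (["pmid", "doi", "isbn"].any fun t => PySem.Str.isIn t (PySem.Str.lower prefix_)) = true
          · rw [if_pos h4]
            have hub : b ≤ 4 := hbdef ▸ hcomp 4 h4
            have hbj : b = 4 := by
              interval_cases b
              · exact absurd (hsound (by omega)) h0
              · exact absurd (hsound (by omega)) h1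
              · exact absurd (hsound (by omega)) h2
              · exact absurd (hsound (by omega)) h3
              · rfl
            rw [hbj]; rfl
          · rw [if_neg h4]
            by_cases h5 : (["wikidata", "schema", "rdf", "owl"].any fun t => PySem.Str.isIn t (PySem.Str.lower prefix_)) = true
            · rw [if_pos h5]
              have hub : b ≤ 5 := hbdef ▸ hcomp 5 h5
              have hbj : b = 5 := by
                interval_cases b
                · exact absurd (hsound (by omega)) h0
                · exact absurd (hsound (by omega)) h1
                · exact absurd (hsound (by omega)) h2
                · exact absurd (hsound (by omega)) h3
                · exact absurd (hsound (by omega)) h4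
                · rfl
              rw [hbj]; rfl
            · rw [if_neg h5]
              have hbj : b = 6 := by
                interval_cases b
                · exact absurd (hsound (by omega)) h0
                · exact absurd (hsound (by omega)) h1
                · exact absurd (hsound (by omega)) h2
                · exact absurd (hsound (by omega)) h3
                · exact absurd (hsound (by omega)) h4
                · exact absurd (hsound (by omega)) h5
                · rfl
              rw [hbj]; rfl
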